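-- pv_equiv track=rewrite | github.com/nithiin7/lang2query | src/agents/column_identifier.py | _group_tables_by_database
-- ===== SOURCE A (Python) =====
-- from typing import List, Dict, Any
--
-- def _group_tables_by_database(table_names: List[str]) -> Dict[str, List[str]]:
--     """Group table names by database. Handles both 'database.table' and 'table' formats."""
--     tables_by_db = {}
--
--     for table_name in table_names:
--         if '.' in table_name:
--             # Format: database.table
--             db_name, table_name_only = table_name.split('.', 1)
--         else:
--             # Format: table (no database prefix) - use 'default' as database name
--             db_name = 'default'
--             table_name_only = table_name
--
--         if db_name not in tables_by_db:
--             tables_by_db[db_name] = []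
--         tables_by_db[db_name].append(table_name_only)
--
--     return tables_by_db
-- ===== SOURCE B (Python) =====
-- from typing import List, Dict, Any
--
-- def _group_tables_by_database(table_names: List[str]) -> Dict[str, List[str]]:
--     """Two-pass grouping: parse every name once, then build each group by filtering."""
--     parsed = [tuple(n.split('.', 1)) if '.' in n else ('default', n) for n in table_names]
--     return {db: [t for d, t in parsed if d == db]
--             for db in dict.fromkeys(d for d, _ in parsed)}
-- ===== Notes on version B (the rewrite author's own statement) =====
-- stated objective: alternative
-- what changed: Replaces the single-pass dict-accumulation (create-key-then-append per element) with a two-pass strategy: parse all names into (db, table) pairs once, dedup the db keys in first-appearance order, then build each group by filtering the parsed list.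
import Mathlib
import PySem

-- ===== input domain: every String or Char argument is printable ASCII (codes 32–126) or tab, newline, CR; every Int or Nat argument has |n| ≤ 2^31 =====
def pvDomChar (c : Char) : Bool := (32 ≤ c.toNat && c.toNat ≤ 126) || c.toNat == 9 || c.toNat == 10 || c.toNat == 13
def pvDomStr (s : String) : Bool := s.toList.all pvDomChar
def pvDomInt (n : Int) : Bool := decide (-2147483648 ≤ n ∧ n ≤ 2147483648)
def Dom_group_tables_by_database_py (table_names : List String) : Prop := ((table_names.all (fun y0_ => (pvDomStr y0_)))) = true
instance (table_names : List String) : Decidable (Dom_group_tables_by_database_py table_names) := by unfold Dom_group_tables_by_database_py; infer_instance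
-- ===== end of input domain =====

-- B replaces A's single-pass dict accumulation by a two-pass parse/dedup/filter grouping (alternative decomposition, same results).


-- ===== PORT A =====
-- shared helper: the parse of one name, "db.table" via split('.', 1) or ('default', name);
-- both Pythons contain this same expression.
def pvParseName (name : String) : String × String :=
  if PySem.Str.isIn "." name then
    match PySem.Str.splitMax? name "." 1 with
    | some (db :: t :: _) => (db, t)
    | _ => ("default", name)   -- unreachable: sep "." is nonempty and present
  else ("default", name)

-- one iteration of A's for-loop: ensure the key exists, then append
def pvStepA (d : PySem.Dict String (List String)) (name : String) :
    PySem.Dict String (List String) :=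
  let p := pvParseName name
  let d1 := if d.contains p.1 then d else d.insert p.1 []
  d1.insert p.1 (d1.getD p.1 [] ++ [p.2])

def group_tables_by_database_py (table_names : List String) : List (String × List String) :=
  (table_names.foldl pvStepA PySem.Dict.empty).items

-- ===== PORT B =====
def group_tables_by_database_py_alt (table_names : List String) : List (String × List String) :=
  let parsed := table_names.map pvParseName
  let dbs := PySem.Set.ofList (parsed.map (fun p => p.1))
  dbs.map (fun db => (db, (parsed.filter (fun p => p.1 == db)).map (fun p => p.2)))

-- ===== PRECONDITION & SPEC =====
def Spec_group_tables_by_database_py (table_names : List String) (out : List (String × List String)) : Prop := out = group_tables_by_database_py_alt table_names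
instance (table_names : List String) (out : List (String × List String)) : Decidable (Spec_group_tables_by_database_py table_names out) := by unfold Spec_group_tables_by_database_py; infer_instance

-- ===== CLAIM (what is proved, stated in full; the proofs are below) =====
def Claim_equal_group_tables_by_database_py : Prop := ∀ (table_names : List String), Dom_group_tables_by_database_py table_names → Spec_group_tables_by_database_py table_names (group_tables_by_database_py table_names)

-- ===== LEMMAS AND PROOFS =====

-- A's loop body is exactly a 'modify with default []' at the parsed key
theorem pvStepA_eq_modify (d : PySem.Dict String (List String)) (name : String) :
    pvStepA d name =
      d.modify (pvParseName name).1 [] (fun x => x ++ [(pvParseName name).2]) := by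
  unfold pvStepA PySem.Dict.modify
  by_cases h : d.contains (pvParseName name).1 = true
  · simp [h]
  · simp only [h, Bool.false_eq_true, if_false]
    rw [PySem.Dict.getD_insert_self, PySem.Dict.insert_insert_self,
        PySem.Dict.getD_of_not_contains _ _ (by simpa using h)]

theorem pvFoldA_eq (table_names : List String) :
    table_names.foldl pvStepA PySem.Dict.empty =
      (table_names.map pvParseName).foldl
        (fun d p => d.modify p.1 [] (fun x => x ++ [p.2])) PySem.Dict.empty := by
  rw [List.foldl_map]
  exact PySem.List.foldl_congr_mem _ _ _ _ (fun d n _ => pvStepA_eq_modify d n)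

-- ===== VERDICT (by name: the statement is the Claim_ definition above) =====
theorem group_tables_by_database_py_spec : Claim_equal_group_tables_by_database_py := by
  intro table_names _
  show _ = _
  unfold group_tables_by_database_py group_tables_by_database_py_alt
  rw [pvFoldA_eq]
  set parsed := table_names.map pvParseName with hp
  have hnd : (parsed.foldl (fun d p => d.modify p.1 [] (fun x => x ++ [p.2]))
      PySem.Dict.empty).keys.Nodup := by
    exact PySem.Dict.nodup_keys_foldl_modify_key parsed (fun p => p.1) []
      (fun _ p => fun x => x ++ [p.2]) PySem.Dict.empty (by simp)
  rw [PySem.Dict.items_eq_map_keys _ hnd []]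
  have hkeys : (parsed.foldl (fun d p => d.modify p.1 [] (fun x => x ++ [p.2]))
      PySem.Dict.empty).keys = PySem.Set.ofList (parsed.map (fun p => p.1)) := by
    rw [PySem.Dict.keys_foldl_modify_key parsed (fun p => p.1) []
      (fun _ p => fun x => x ++ [p.2]) PySem.Dict.empty]
    simp [PySem.Set.update_nil_left]
  rw [hkeys]
  refine List.map_congr_left (fun db _ => ?_)
  rw [PySem.Dict.getD_foldl_modify_append]
  simp
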